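-- pv_equiv track=rewrite | github.com/tos-kamiya/skih-tool | train_model.py | split_to_tseqwon_and_liseq
-- ===== SOURCE A (Python) =====
-- def split_to_tseqwon_and_liseq(tseq):
--     tseqwon = []
--     liseq = []
--
--     li = 0
--     for t in tseq:
--         if t == '$$':
--             li += 1
--         else:
--             tseqwon.append(t)
--             liseq.append(li)
--
--     return tseqwon, liseq
-- ===== SOURCE B (Python) =====
-- def split_to_tseqwon_and_liseq(tseq):
--     tseqwon = []
--     liseq = []
--     li = 0
--     i = 0
--     n = len(tseq)
--     while i < n:
--         j = i
--         if tseq[i] == '$$':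
--             while j < n and tseq[j] == '$$':
--                 j += 1
--             li += j - i
--         else:
--             while j < n and tseq[j] != '$$':
--                 j += 1
--             tseqwon.extend(tseq[i:j])
--             liseq.extend([li] * (j - i))
--         i = j
--     return tseqwon, liseq
-- ===== Notes on version B (the rewrite author's own statement) =====
-- stated objective: alternative
-- what changed: B walks maximal runs of markers / non-markers with two pointers, extending the outputs a whole run at a time ([li]*(j-i)), instead of A's element-by-element loop with per-token appends.
import Mathlib
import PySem

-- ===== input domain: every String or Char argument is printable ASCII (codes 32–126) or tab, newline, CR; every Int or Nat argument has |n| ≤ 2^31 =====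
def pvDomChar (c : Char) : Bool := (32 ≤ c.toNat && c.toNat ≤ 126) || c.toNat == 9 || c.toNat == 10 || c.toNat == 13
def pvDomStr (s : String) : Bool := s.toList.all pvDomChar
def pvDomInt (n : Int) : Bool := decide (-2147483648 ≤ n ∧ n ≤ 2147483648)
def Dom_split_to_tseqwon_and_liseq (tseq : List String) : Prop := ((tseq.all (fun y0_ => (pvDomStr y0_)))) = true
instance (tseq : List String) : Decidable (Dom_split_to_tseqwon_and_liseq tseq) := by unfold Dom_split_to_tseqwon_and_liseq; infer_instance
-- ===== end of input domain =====

-- B replaces A's per-token loop by a two-pointer scan over maximal runs of markers/non-markers,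
-- extending the outputs one whole run at a time (alternative decomposition, same return value).

-- ===== PORT A =====
-- state: (tseqwon, liseq, li); one step per token, exactly as A's for-loop
def split_to_tseqwon_and_liseq (tseq : List String) : List String × List Int :=
  let st := tseq.foldl
    (fun (acc : List String × List Int × Int) t =>
      if t = "$$" then (acc.1, acc.2.1, acc.2.2 + 1)
      else (acc.1 ++ [t], acc.2.1 ++ [acc.2.2], acc.2.2))
    ([], [], 0)
  (st.1, st.2.1)

-- ===== PORT B =====
-- each call consumes one maximal run (B's outer while iteration); takeWhile/dropWhile are the
-- inner while-loop advancing j; replicate run.length li is [li] * (j - i)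
def pvAltGo : List String → Int → List String × List Int
  | [], _ => ([], [])
  | t :: rest, li =>
    if t = "$$" then
      let run := rest.takeWhile (fun s => s = "$$")
      pvAltGo (rest.dropWhile (fun s => s = "$$")) (li + 1 + run.length)
    else
      let run := rest.takeWhile (fun s => ¬ s = "$$")
      let (ws, ls) := pvAltGo (rest.dropWhile (fun s => ¬ s = "$$")) li
      (t :: run ++ ws, li :: List.replicate run.length li ++ ls)
termination_by l _ => l.length
decreasing_by
  · exact Nat.lt_succ_of_le (List.length_dropWhile_le _ _)
  · exact Nat.lt_succ_of_le (List.length_dropWhile_le _ _)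

def split_to_tseqwon_and_liseq_alt (tseq : List String) : List String × List Int :=
  pvAltGo tseq 0

-- ===== PRECONDITION & SPEC =====
def Spec_split_to_tseqwon_and_liseq (tseq : List String) (out : List String × List Int) : Prop := out = split_to_tseqwon_and_liseq_alt tseq
instance (tseq : List String) (out : List String × List Int) : Decidable (Spec_split_to_tseqwon_and_liseq tseq out) := by unfold Spec_split_to_tseqwon_and_liseq; infer_instance

-- ===== CLAIM (what is proved, stated in full; the proofs are below) =====
def Claim_equal_split_to_tseqwon_and_liseq : Prop := ∀ (tseq : List String), Dom_split_to_tseqwon_and_liseq tseq → Spec_split_to_tseqwon_and_liseq tseq (split_to_tseqwon_and_liseq tseq)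

-- ===== LEMMAS AND PROOFS =====

-- reference one-token-at-a-time recursion, a middle ground between the two ports
def pvGo : List String → Int → List String × List Int
  | [], _ => ([], [])
  | t :: rest, li =>
    if t = "$$" then pvGo rest (li + 1)
    else
      let (ws, ls) := pvGo rest li
      (t :: ws, li :: ls)

theorem pvGo_markers (run : List String) (h : ∀ s ∈ run, s = "$$") :
    ∀ (rest : List String) (li : Int), pvGo (run ++ rest) li = pvGo rest (li + run.length) := by
  induction run with
  | nil => intro rest li; simp
  | cons a as ih =>
    intro rest li
    have ha : a = "$$" := h a (by simp)
    have has : ∀ s ∈ as, s = "$$" := fun s hs => h s (by simp [hs])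
    subst ha
    have h1 : pvGo ("$$" :: (as ++ rest)) li = pvGo (as ++ rest) (li + 1) := by simp [pvGo]
    rw [List.cons_append, h1, ih has]
    congr 1
    simp only [List.length_cons]
    push_cast
    ring

theorem pvGo_words (run : List String) (h : ∀ s ∈ run, ¬ s = "$$") :
    ∀ (rest : List String) (li : Int),
      pvGo (run ++ rest) li =
        (run ++ (pvGo rest li).1, List.replicate run.length li ++ (pvGo rest li).2) := by
  induction run with
  | nil => intro rest li; simp
  | cons a as ih =>
    intro rest li
    have ha : ¬ a = "$$" := h a (by simp)
    have has : ∀ s ∈ as, ¬ s = "$$" := fun s hs => h s (by simp [hs])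
    simp only [List.cons_append, pvGo, if_neg ha, ih has, List.length_cons, List.replicate_succ]

theorem pvAltGo_eq_pvGo (l : List String) (li : Int) : pvAltGo l li = pvGo l li := by
  match l with
    | [] => simp [pvAltGo, pvGo]
    | t :: rest =>
      by_cases ht : t = "$$"
      · have hsplit : rest = rest.takeWhile (fun s => s = "$$") ++ rest.dropWhile (fun s => s = "$$") :=
          (List.takeWhile_append_dropWhile).symm
        have hmem : ∀ s ∈ rest.takeWhile (fun s => s = "$$"), s = "$$" := by
          intro s hs
          simpa using List.mem_takeWhile_imp hs
        subst ht
        have h1 : pvAltGo ("$$" :: rest) li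
            = pvAltGo (rest.dropWhile (fun s => s = "$$"))
                (li + 1 + (rest.takeWhile (fun s => s = "$$")).length) := by
          simp [pvAltGo]
        have h2 : pvGo ("$$" :: rest) li = pvGo rest (li + 1) := by simp [pvGo]
        rw [h1, pvAltGo_eq_pvGo, h2]
        conv_rhs => rw [hsplit]
        rw [pvGo_markers _ hmem]
      · have hsplit : rest = rest.takeWhile (fun s => ¬ s = "$$") ++ rest.dropWhile (fun s => ¬ s = "$$") := by
          simpa using (List.takeWhile_append_dropWhile (p := fun s => !(s == "$$")) (l := rest)).symm
        have hmem : ∀ s ∈ rest.takeWhile (fun s => ¬ s = "$$"), ¬ s = "$$" := by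
          intro s hs
          simpa using List.mem_takeWhile_imp hs
        rw [pvAltGo, if_neg ht]
        rw [pvAltGo_eq_pvGo]
        conv_rhs => rw [pvGo, if_neg ht, hsplit, pvGo_words _ hmem]
        simp
termination_by l.length
decreasing_by
  all_goals exact Nat.lt_succ_of_le (List.length_dropWhile_le _ _)

theorem pvFoldl_eq_pvGo : ∀ (l : List String) (w : List String) (s : List Int) (li : Int),
    ((l.foldl
        (fun (acc : List String × List Int × Int) t =>
          if t = "$$" then (acc.1, acc.2.1, acc.2.2 + 1)
          else (acc.1 ++ [t], acc.2.1 ++ [acc.2.2], acc.2.2))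
        (w, s, li)).1,
     (l.foldl
        (fun (acc : List String × List Int × Int) t =>
          if t = "$$" then (acc.1, acc.2.1, acc.2.2 + 1)
          else (acc.1 ++ [t], acc.2.1 ++ [acc.2.2], acc.2.2))
        (w, s, li)).2.1) = (w ++ (pvGo l li).1, s ++ (pvGo l li).2) := by
  intro l
  induction l with
  | nil => intro w s li; simp [pvGo]
  | cons t rest ih =>
    intro w s li
    by_cases ht : t = "$$" <;>
      simp [List.foldl_cons, pvGo, ht, ih, List.append_assoc]

-- ===== VERDICT (by name: the statement is the Claim_ definition above) =====
theorem split_to_tseqwon_and_liseq_spec : Claim_equal_split_to_tseqwon_and_liseq := by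
  intro tseq _
  show _ = _
  unfold split_to_tseqwon_and_liseq split_to_tseqwon_and_liseq_alt
  rw [pvAltGo_eq_pvGo]
  simpa using pvFoldl_eq_pvGo tseq [] [] 0
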